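-- pv_equiv track=rewrite | github.com/WangYiJie020/ysyx-workbench-nemu-inst-gen | test.py | get_field_expr
-- ===== SOURCE A (Python) =====
-- def expr_atbit(bit) -> str:
--     return f"GET_BITAT({bit})"
--
-- def expr_bits(high:int, low:int) -> str:
--     return f"GET_BITS({high}, {low})"
--
-- def expr_lshift(expr:str, amount:int) -> str:
--     if amount == 0:
--         return expr
--     return f"({expr} << {amount})"
--
-- def get_field_expr(s:str) -> (str,int):
--     if s.isdigit():
--         return (expr_atbit(int(s)), 1)
--     else:
--         groups = s.split("|")
--         exprs = []
--         width = 0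
--         for g in reversed(groups):
--             if "-" in g:
--                 high, low = map(int, g.split("-"))
--                 exprs.append(expr_lshift(expr_bits(high, low), width))
--                 width += (high - low + 1)
--             else:
--                 width += 1
--                 exprs.append(expr_lshift(expr_atbit(int(g)), width - 1))
--         return (" | ".join(exprs), width)
-- ===== SOURCE B (Python) =====
-- def get_field_expr(s: str) -> (str, int):
--     if s.isdigit():
--         return (f"GET_BITAT({int(s)})", 1)
--     # pass 1: atoms and widths in natural group order
--     parts = []
--     for g in s.split("|"):
--         if "-" in g:
--             high, low = map(int, g.split("-"))
--             parts.append((f"GET_BITS({high}, {low})", high - low + 1))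
--         else:
--             parts.append((f"GET_BITAT({int(g)})", 1))
--     total = sum(w for _, w in parts)
--     # pass 2: each group's shift is the suffix sum of widths to its right
--     out = []
--     shift = total
--     for atom, w in parts:
--         shift -= w
--         out.append(atom if shift == 0 else f"({atom} << {shift})")
--     return (" | ".join(reversed(out)), total)
-- ===== Notes on version B (the rewrite author's own statement) =====
-- stated objective: alternative
-- what changed: A walks the groups in reversed order threading a running width accumulator that doubles as the shift; B first maps each group (in natural order) to an (atom, width) pair, computes the total width, derives each group's shift as the suffix sum of widths to its right in a second pass, and joins the results reversed.
import Mathlib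
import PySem

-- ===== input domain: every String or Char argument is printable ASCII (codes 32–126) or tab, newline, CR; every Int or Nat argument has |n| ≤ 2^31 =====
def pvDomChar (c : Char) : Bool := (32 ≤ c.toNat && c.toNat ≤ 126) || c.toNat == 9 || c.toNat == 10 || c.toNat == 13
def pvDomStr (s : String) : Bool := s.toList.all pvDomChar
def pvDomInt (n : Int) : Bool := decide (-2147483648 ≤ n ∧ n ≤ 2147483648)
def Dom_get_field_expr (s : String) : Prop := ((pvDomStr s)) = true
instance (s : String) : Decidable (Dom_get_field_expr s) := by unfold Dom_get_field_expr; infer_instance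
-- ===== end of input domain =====

-- B replaces A's reversed-order loop with a running width accumulator by a two-pass
-- decomposition: atoms+widths in natural order, shifts as suffix sums, reversed join (objective: alternative).

-- ===== PORT A =====
-- s.split(sep) with sep ≠ "" (Python raises only for sep = "", which never occurs here)
def pvSplit (s sep : String) : List String := (PySem.Str.split? s sep).getD []

def expr_atbit (bit : Int) : String := "GET_BITAT(" ++ PySem.Int.toStr bit ++ ")"

def expr_bits (high low : Int) : String :=
  "GET_BITS(" ++ PySem.Int.toStr high ++ ", " ++ PySem.Int.toStr low ++ ")"

def expr_lshift (expr : String) (amount : Int) : String :=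
  if amount == 0 then expr
  else "(" ++ expr ++ " << " ++ PySem.Int.toStr amount ++ ")"

-- loop body of A's 'for g in reversed(groups)'; the wildcard case is where Python raises
def stepA (st : List String × Int) (g : String) : List String × Int :=
  if PySem.Str.isIn "-" g then
    match pvSplit g "-" with
    | [h, l] =>
      let high := (PySem.Int.ofStr? h).getD 0
      let low := (PySem.Int.ofStr? l).getD 0
      (st.1 ++ [expr_lshift (expr_bits high low) st.2], st.2 + (high - low + 1))
    | _ => (st.1, st.2)
  else
    let width := st.2 + 1
    (st.1 ++ [expr_lshift (expr_atbit ((PySem.Int.ofStr? g).getD 0)) (width - 1)], width)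

def get_field_expr (s : String) : String × Int :=
  if PySem.Str.strIsdigit s then (expr_atbit ((PySem.Int.ofStr? s).getD 0), 1)
  else
    let groups := pvSplit s "|"
    let res := groups.reverse.foldl stepA ([], 0)
    (PySem.Str.join " | " res.1, res.2)

-- ===== PORT B =====
-- pass 1 body: (atom expression, width) of one group; the wildcard case is where Python raises
def pvPart (g : String) : String × Int :=
  if PySem.Str.isIn "-" g then
    match pvSplit g "-" with
    | [h, l] =>
      let high := (PySem.Int.ofStr? h).getD 0
      let low := (PySem.Int.ofStr? l).getD 0
      ("GET_BITS(" ++ PySem.Int.toStr high ++ ", " ++ PySem.Int.toStr low ++ ")", high - low + 1)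
    | _ => ("", 0)
  else
    ("GET_BITAT(" ++ PySem.Int.toStr ((PySem.Int.ofStr? g).getD 0) ++ ")", 1)

-- pass 2 body: suffix-sum shift
def stepB (st : List String × Int) (p : String × Int) : List String × Int :=
  let shift := st.2 - p.2
  (st.1 ++ [if shift == 0 then p.1
            else "(" ++ p.1 ++ " << " ++ PySem.Int.toStr shift ++ ")"], shift)

def get_field_expr_alt (s : String) : String × Int :=
  if PySem.Str.strIsdigit s then
    ("GET_BITAT(" ++ PySem.Int.toStr ((PySem.Int.ofStr? s).getD 0) ++ ")", 1)
  else
    let parts := (pvSplit s "|").map pvPart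
    let total := parts.foldl (fun acc p => acc + p.2) 0
    let out := (parts.foldl stepB ([], total)).1
    (PySem.Str.join " | " out.reverse, total)

-- ===== PRECONDITION & SPEC =====
-- a group Python's int() accepts: either a bare int literal, or 'a-b' with both halves int literals
def pvOkGroup (g : String) : Bool :=
  if PySem.Str.isIn "-" g then
    match pvSplit g "-" with
    | [h, l] => (PySem.Int.ofStr? h).isSome && (PySem.Int.ofStr? l).isSome
    | _ => false
  else (PySem.Int.ofStr? g).isSome

-- Pre_ excludes exactly the inputs on which A raises ValueError (a group int() rejects,
-- or a '-' group that does not split into exactly two int literals).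
def Pre_get_field_expr (s : String) : Prop :=
  PySem.Str.strIsdigit s = true ∨ (pvSplit s "|").all pvOkGroup = true

instance (s : String) : Decidable (Pre_get_field_expr s) := by
  unfold Pre_get_field_expr; infer_instance

def pvWitness_get_field_expr : String := "6-2|0"

def Spec_get_field_expr (s : String) (out : String × Int) : Prop := out = get_field_expr_alt s
instance (s : String) (out : String × Int) : Decidable (Spec_get_field_expr s out) := by
  unfold Spec_get_field_expr; infer_instance

-- ===== CLAIM (what is proved, stated in full; the proofs are below) =====
def Claim_equal_get_field_expr : Prop :=
  ∀ (s : String), Dom_get_field_expr s → Pre_get_field_expr s →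
    Spec_get_field_expr s (get_field_expr s)

-- ===== LEMMAS AND PROOFS =====
def pvS (gs : List String) : Int := (gs.map (fun g => (pvPart g).2)).sum

def pvBuildA : List String → Int → List String
  | [], _ => []
  | g :: r, w => expr_lshift (pvPart g).1 w :: pvBuildA r (w + (pvPart g).2)

def pvBuildB : List (String × Int) → Int → List String
  | [], _ => []
  | p :: r, t => expr_lshift p.1 (t - p.2) :: pvBuildB r (t - p.2)

theorem stepA_ok (g : String) (h : pvOkGroup g = true) (acc : List String) (w : Int) :
    stepA (acc, w) g = (acc ++ [expr_lshift (pvPart g).1 w], w + (pvPart g).2) := by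
  unfold stepA pvPart
  unfold pvOkGroup at h
  by_cases hin : PySem.Str.isIn "-" g = true
  · simp only [hin, if_true] at *
    rcases hsp : pvSplit g "-" with _ | ⟨a, _ | ⟨b, _ | ⟨c, r⟩⟩⟩ <;>
      simp [hsp] at h ⊢
    rfl
  · simp only [hin, if_false, Bool.false_eq_true] at *
    refine Prod.ext ?_ ?_
    · simp only []
      have : w + 1 - 1 = w := by ring
      rw [this]
      rfl
    · simp only []

theorem foldA_char (gs : List String) (h : ∀ g ∈ gs, pvOkGroup g = true)
    (acc : List String) (w : Int) :
    gs.foldl stepA (acc, w) = (acc ++ pvBuildA gs w, w + pvS gs) := by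
  induction gs generalizing acc w with
  | nil => simp [pvBuildA, pvS]
  | cons g r ih =>
    have hg := h g (by simp)
    simp only [List.foldl_cons, stepA_ok g hg acc w]
    rw [ih (fun x hx => h x (by simp [hx]))]
    simp [pvBuildA, pvS]
    ring

theorem foldB_char (ps : List (String × Int)) (acc : List String) (t : Int) :
    ps.foldl stepB (acc, t) = (acc ++ pvBuildB ps t, t - (ps.map Prod.snd).sum) := by
  induction ps generalizing acc t with
  | nil => simp [pvBuildB]
  | cons p r ih =>
    simp only [List.foldl_cons, stepB]
    rw [ih]
    simp [pvBuildB, expr_lshift]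
    ring

theorem foldl_add_snd (ps : List (String × Int)) (a : Int) :
    ps.foldl (fun acc p => acc + p.2) a = a + (ps.map Prod.snd).sum := by
  induction ps generalizing a with
  | nil => simp
  | cons p r ih => simp [ih]; ring

theorem buildA_append (xs : List String) (g : String) (w : Int) :
    pvBuildA (xs ++ [g]) w = pvBuildA xs w ++ [expr_lshift (pvPart g).1 (w + pvS xs)] := by
  induction xs generalizing w with
  | nil => simp [pvBuildA, pvS]
  | cons x r ih =>
    simp only [List.cons_append, pvBuildA, ih]
    simp [pvS]
    ring_nf

theorem pvS_reverse (gs : List String) : pvS gs.reverse = pvS gs := by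
  simp [pvS]

theorem key_rev (gs : List String) (w : Int) :
    pvBuildA gs.reverse w = (pvBuildB (gs.map pvPart) (w + pvS gs)).reverse := by
  induction gs generalizing w with
  | nil => simp [pvBuildA, pvBuildB]
  | cons g r ih =>
    have hS : pvS (g :: r) = (pvPart g).2 + pvS r := by simp [pvS]
    simp only [List.reverse_cons, buildA_append, pvS_reverse, List.map_cons, pvBuildB,
      List.reverse_cons]
    rw [ih]
    have h1 : w + pvS (g :: r) - (pvPart g).2 = w + pvS r := by rw [hS]; ring
    rw [h1]

theorem map_snd_map_pvPart (gs : List String) :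
    ((gs.map pvPart).map Prod.snd).sum = pvS gs := by
  simp only [pvS, List.map_map]
  rfl

-- ===== VERDICT (by name: the statement is the Claim_ definition above) =====
theorem get_field_expr_spec : Claim_equal_get_field_expr := by
  unfold Claim_equal_get_field_expr
  intro s _hdom hpre
  unfold Spec_get_field_expr get_field_expr get_field_expr_alt
  by_cases hd : PySem.Str.strIsdigit s = true
  · rw [if_pos hd, if_pos hd]
    rfl
  · rw [if_neg hd, if_neg hd]
    dsimp only
    have hall : (pvSplit s "|").all pvOkGroup = true := by
      rcases hpre with h | h
      · exact absurd h hd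
      · exact h
    have hok : ∀ g ∈ pvSplit s "|", pvOkGroup g = true := by
      intro g hg; exact List.all_eq_true.mp hall g hg
    have hokr : ∀ g ∈ (pvSplit s "|").reverse, pvOkGroup g = true := by
      intro g hg; exact hok g (List.mem_reverse.mp hg)
    rw [foldA_char _ hokr [] 0, foldB_char, foldl_add_snd]
    simp only [List.nil_append, map_snd_map_pvPart, zero_add]
    rw [key_rev, pvS_reverse, zero_add]
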